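-- pv_equiv track=rewrite | github.com/ripaaf/fair-sorting | main.py | _sanitize_media_error
-- ===== SOURCE A (Python) =====
-- def _sanitize_media_error(error_text: str, fallback: str = "Preview decoder unavailable") -> str:
--     lines = [line.strip() for line in error_text.splitlines() if line.strip()]
--     if not lines:
--         return fallback
--     message = lines[-1]
--     if len(message) > 140:
--         message = message[:137].rstrip() + "..."
--     return message
-- ===== SOURCE B (Python) =====
-- def _sanitize_media_error(error_text: str, fallback: str = "Preview decoder unavailable") -> str:
--     for line in reversed(error_text.splitlines()):
--         stripped = line.strip()
--         if stripped:
--             if len(stripped) > 140: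
--                 stripped = stripped[:137].rstrip() + "..."
--             return stripped
--     return fallback
-- ===== Notes on version B (the rewrite author's own statement) =====
-- stated objective: simpler
-- what changed: B scans splitlines in reverse and stops at the first non-empty stripped line instead of building a filtered list of all stripped lines and indexing its last element.
import Mathlib
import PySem

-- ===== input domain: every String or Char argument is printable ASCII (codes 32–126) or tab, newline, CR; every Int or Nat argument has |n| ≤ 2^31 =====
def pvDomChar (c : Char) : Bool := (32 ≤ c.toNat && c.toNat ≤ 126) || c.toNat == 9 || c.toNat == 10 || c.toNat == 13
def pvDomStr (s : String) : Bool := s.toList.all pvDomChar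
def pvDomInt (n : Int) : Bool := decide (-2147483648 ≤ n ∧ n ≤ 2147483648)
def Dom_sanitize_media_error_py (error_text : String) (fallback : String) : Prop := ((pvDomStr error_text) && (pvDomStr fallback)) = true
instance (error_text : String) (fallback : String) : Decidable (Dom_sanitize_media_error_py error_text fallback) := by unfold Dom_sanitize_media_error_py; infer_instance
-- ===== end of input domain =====

-- B replaces the filtered list comprehension + negative index by an early-exit reverse scan (simpler; same cost).

-- ===== PORT A =====
-- lines = [line.strip() for line in error_text.splitlines() if line.strip()]; lines[-1]; truncate
def sanitize_media_error_py (error_text : String) (fallback : String) : String :=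
  let lines := ((PySem.Str.splitlines error_text).map PySem.Str.strip).filter (fun l => l ≠ "")
  if lines = [] then fallback
  else
    -- lines[-1]: lines is non-empty here, so pyGet? is some; .getD "" is exact
    let message := (PySem.List.pyGet? lines (-1)).getD ""
    if PySem.Str.len message > 140 then
      PySem.Str.rstrip (PySem.Str.slice message none (some 137)) ++ "..."
    else message

-- ===== PORT B =====
-- the 'for line in reversed(...)' loop with early return: first non-empty stripped line of the reversed list
def pvFindStripped : List String → Option String
  | [] => none
  | line :: rest =>
      let stripped := PySem.Str.strip line
      if stripped = "" then pvFindStripped rest else some stripped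

def sanitize_media_error_py_alt (error_text : String) (fallback : String) : String :=
  match pvFindStripped (PySem.Str.splitlines error_text).reverse with
  | some stripped =>
      if PySem.Str.len stripped > 140 then
        PySem.Str.rstrip (PySem.Str.slice stripped none (some 137)) ++ "..."
      else stripped
  | none => fallback

-- ===== PRECONDITION & SPEC =====
def Spec_sanitize_media_error_py (error_text : String) (fallback : String) (out : String) : Prop := out = sanitize_media_error_py_alt error_text fallback
instance (error_text : String) (fallback : String) (out : String) : Decidable (Spec_sanitize_media_error_py error_text fallback out) := by unfold Spec_sanitize_media_error_py; infer_instance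

-- ===== CLAIM (what is proved, stated in full; the proofs are below) =====
def Claim_equal_sanitize_media_error_py : Prop := ∀ (error_text : String) (fallback : String), Dom_sanitize_media_error_py error_text fallback → Spec_sanitize_media_error_py error_text fallback (sanitize_media_error_py error_text fallback)

-- ===== LEMMAS AND PROOFS =====

theorem pvFindStripped_append (xs ys : List String) :
    pvFindStripped (xs ++ ys) =
      match pvFindStripped xs with
      | some v => some v
      | none => pvFindStripped ys := by
  induction xs with
  | nil => simp [pvFindStripped]
  | cons a xs ih =>
    simp only [List.cons_append, pvFindStripped]
    split_ifs with h
    · exact ih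
    · rfl

/-- The reverse early-exit scan finds exactly the last element of A's filtered list. -/
theorem pvFindStripped_reverse (l : List String) :
    pvFindStripped l.reverse =
      ((l.map PySem.Str.strip).filter (fun s => s ≠ "")).getLast? := by
  induction l with
  | nil => rfl
  | cons a l ih =>
    rw [List.reverse_cons, pvFindStripped_append, ih]
    simp only [List.map_cons, List.filter_cons, ne_eq]
    by_cases h : PySem.Str.strip a = ""
    · simp only [h, not_true_eq_false, decide_false, Bool.false_eq_true, if_false]
      cases hF : (List.filter (fun s => decide ¬s = "") (List.map PySem.Str.strip l)).getLast? with
      | none => simp [pvFindStripped, h]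
      | some v => rfl
    · simp only [h, not_false_eq_true, decide_true, if_true]
      cases hFl : List.filter (fun s => decide ¬s = "") (List.map PySem.Str.strip l) with
      | nil => simp [pvFindStripped, h]
      | cons b F' =>
        rw [List.getLast?_cons_cons]
        cases hv : (b :: F').getLast? with
        | none => simp at hv
        | some v => rfl

-- ===== VERDICT (by name: the statement is the Claim_ definition above) =====
theorem sanitize_media_error_py_spec : Claim_equal_sanitize_media_error_py := by
  intro error_text fallback _
  unfold Spec_sanitize_media_error_py sanitize_media_error_py sanitize_media_error_py_alt
  rw [pvFindStripped_reverse]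
  set F := (((PySem.Str.splitlines error_text).map PySem.Str.strip).filter (fun s => s ≠ "")) with hFdef
  by_cases hF : F = []
  · simp [hF]
  · have hsome : ∃ v, F.getLast? = some v := by
      cases h : F.getLast? with
      | none => exact absurd (List.getLast?_eq_none_iff.mp h) hF
      | some v => exact ⟨v, rfl⟩
    obtain ⟨v, hv⟩ := hsome
    simp [hF, PySem.List.pyGet?_neg_one, hv]
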